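-- pv_equiv track=rewrite | github.com/quossi310-cmyk/Quossi | api/quossi_2_0.py | streak_direction
-- ===== SOURCE A (Python) =====
-- from typing import Dict, List, Optional, Tuple
--
-- def streak_direction(scores: List[int]) -> Tuple[str, int]:
--     if len(scores) < 2:
--         return ("steady", 1)
--     direction = "steady"
--     length = 1
--     for i in range(len(scores) - 1, 0, -1):
--         diff = scores[i] - scores[i - 1]
--         step_dir = "up" if diff > 0 else "down" if diff < 0 else "steady"
--         if direction == "steady":
--             direction = step_dir
--             length = 1
--         elif step_dir == direction and step_dir != "steady":
--             length += 1
--         else: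
--             break
--     return (direction, length)
-- ===== SOURCE B (Python) =====
-- from typing import Dict, List, Optional, Tuple
--
-- def streak_direction(scores: List[int]) -> Tuple[str, int]:
--     # build the table of step signs, newest first, trim steady steps, count the run
--     signs = [(b > a) - (b < a) for a, b in zip(scores, scores[1:])]
--     rev = signs[::-1]
--     while rev and rev[0] == 0:
--         rev = rev[1:]
--     if not rev:
--         return ("steady", 1)
--     s = rev[0]
--     run = 0
--     for x in rev:
--         if x != s:
--             break
--         run += 1
--     return ("up" if s > 0 else "down", run)
-- ===== Notes on version B (the rewrite author's own statement) =====
-- stated objective: alternative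
-- what changed: Replaces A's fused backward index loop with state machine by a build-table-then-scan decomposition: compute the list of step signs, trim trailing steady steps, then count the trailing run of the last sign.
import Mathlib
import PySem

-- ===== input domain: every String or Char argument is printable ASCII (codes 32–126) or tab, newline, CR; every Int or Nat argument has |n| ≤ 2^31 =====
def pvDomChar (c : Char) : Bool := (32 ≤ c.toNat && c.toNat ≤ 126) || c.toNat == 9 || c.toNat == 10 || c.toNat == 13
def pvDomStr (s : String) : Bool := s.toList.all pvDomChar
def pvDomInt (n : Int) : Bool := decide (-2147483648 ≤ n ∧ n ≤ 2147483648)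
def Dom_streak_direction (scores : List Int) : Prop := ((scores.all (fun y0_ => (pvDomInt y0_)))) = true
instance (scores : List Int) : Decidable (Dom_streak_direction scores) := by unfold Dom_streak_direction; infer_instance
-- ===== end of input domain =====

-- B replaces A's fused backward reset-loop by a build-signs-table, trim-trailing-zeros, count-run decomposition (objective: alternative).

-- ===== PORT A =====
-- A's backward loop 'for i in range(len(scores)-1, 0, -1)' with early break; indices
-- i and i-1 are always in range (1 ≤ i ≤ len-1), so getD is exact here.
def streakALoop (scores : List Int) : Nat → String → Int → String × Int
  | 0, direction, length => (direction, length)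
  | i + 1, direction, length =>
      let diff := scores.getD (i + 1) 0 - scores.getD i 0
      let step_dir := if diff > 0 then "up" else if diff < 0 then "down" else "steady"
      if direction = "steady" then
        streakALoop scores i step_dir 1
      else if step_dir = direction ∧ step_dir ≠ "steady" then
        streakALoop scores i direction (length + 1)
      else
        (direction, length)

def streak_direction (scores : List Int) : String × Int :=
  if scores.length < 2 then ("steady", 1)
  else streakALoop scores (scores.length - 1) "steady" 1

-- ===== PORT B =====
-- the 'for x in rev: if x != s: break; run += 1' counting loop of Source B
def streakBRun (s : Int) : List Int → Int
  | [] => 0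
  | x :: rest => if x ≠ s then 0 else streakBRun s rest + 1

def streak_direction_alt (scores : List Int) : String × Int :=
  let signs := (scores.zip scores.tail).map
      (fun p => (if p.2 > p.1 then (1 : Int) else 0) - (if p.2 < p.1 then 1 else 0))
  let rev := (signs.reverse).dropWhile (fun x => x == 0)   -- the 'while rev and rev[0]==0' trim
  match rev with
  | [] => ("steady", 1)
  | s :: _ => ((if s > 0 then "up" else "down"), streakBRun s rev)

-- ===== PRECONDITION & SPEC =====
def Spec_streak_direction (scores : List Int) (out : String × Int) : Prop := out = streak_direction_alt scores
instance (scores : List Int) (out : String × Int) : Decidable (Spec_streak_direction scores out) := by unfold Spec_streak_direction; infer_instance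

-- ===== CLAIM (what is proved, stated in full; the proofs are below) =====
def Claim_equal_streak_direction : Prop := ∀ (scores : List Int), Dom_streak_direction scores → Spec_streak_direction scores (streak_direction scores)

-- ===== LEMMAS AND PROOFS =====

-- sign of the step ending at index i (1 ≤ i); helper for the proof only
def pvSign (d : Int) : Int := if d > 0 then 1 else if d < 0 then -1 else 0

-- the reversed list of signs [sign(diff i), sign(diff (i-1)), …, sign(diff 1)]
def pvRevSigns (scores : List Int) : Nat → List Int
  | 0 => []
  | i + 1 => pvSign (scores.getD (i + 1) 0 - scores.getD i 0) :: pvRevSigns scores i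

-- B's tail computation (trim + head test + run count) as one function of the reversed sign list
def pvProc (L : List Int) : String × Int :=
  let rev := L.dropWhile (fun x => x == 0)
  match rev with
  | [] => ("steady", 1)
  | s :: _ => ((if s > 0 then "up" else "down"), streakBRun s rev)

theorem pvRevSigns_getElem (scores : List Int) :
    ∀ i m (_ : m < i) (h : m < (pvRevSigns scores i).length),
      (pvRevSigns scores i)[m] =
        pvSign (scores.getD (i - m) 0 - scores.getD (i - m - 1) 0) := by
  intro i
  induction i with
  | zero => intro m hm; omega
  | succ i ih =>
      intro m hm h
      cases m with
      | zero => simp [pvRevSigns]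
      | succ m =>
          have hm' : m < i := by omega
          simp only [pvRevSigns, List.getElem_cons_succ]
          rw [show i + 1 - (m + 1) = i - m from by omega]
          exact ih m hm' (by simpa [pvRevSigns] using h)

theorem pvRevSigns_length (scores : List Int) (i : Nat) :
    (pvRevSigns scores i).length = i := by
  induction i with
  | zero => rfl
  | succ i ih => simp [pvRevSigns, ih]

theorem pvSigns_reverse_eq (scores : List Int) :
    ((scores.zip scores.tail).map
        (fun p => (if p.2 > p.1 then (1 : Int) else 0) - (if p.2 < p.1 then 1 else 0))).reverse
      = pvRevSigns scores (scores.length - 1) := by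
  apply List.ext_getElem
  · simp [pvRevSigns_length, List.length_zip, List.length_tail]
  · intro m h1 h2
    have hlen : (scores.zip scores.tail).length = scores.length - 1 := by
      simp [List.length_zip, List.length_tail]
    have hm : m < scores.length - 1 := by
      simpa [hlen] using h1
    rw [pvRevSigns_getElem scores _ m hm h2]
    simp only [List.getElem_reverse]
    have hk : (scores.zip scores.tail).map
        (fun p => (if p.2 > p.1 then (1 : Int) else 0) - (if p.2 < p.1 then 1 else 0)) =
        (scores.zip scores.tail).map
        (fun p => pvSign (p.2 - p.1)) := by
      apply List.map_congr_left
      intro p _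
      unfold pvSign
      split_ifs <;> omega
    simp only [List.length_map, hk, List.getElem_map, List.getElem_zip, List.getElem_tail, hlen]
    have hlt : scores.length - 1 - 1 - m + 1 < scores.length := by omega
    have hlt2 : scores.length - 1 - 1 - m < scores.length := by omega
    rw [show scores.length - 1 - m = scores.length - 1 - 1 - m + 1 from by omega,
        show scores.length - 1 - 1 - m + 1 - 1 = scores.length - 1 - 1 - m from by omega,
        List.getD_eq_getElem _ _ hlt, List.getD_eq_getElem _ _ hlt2]

theorem streakALoop_run (scores : List Int) (dir : String) (s : Int)
    (hds : (dir = "up" ∧ s = 1) ∨ (dir = "down" ∧ s = -1)) :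
    ∀ i (l : Int), streakALoop scores i dir l = (dir, l + streakBRun s (pvRevSigns scores i)) := by
  intro i
  induction i with
  | zero =>
      intro l
      rcases hds with ⟨h1, h2⟩ | ⟨h1, h2⟩ <;> simp [streakALoop, pvRevSigns, streakBRun, h1, h2]
  | succ i ih =>
      intro l
      rcases hds with ⟨h1, h2⟩ | ⟨h1, h2⟩ <;>
      · subst h1 h2
        simp only [streakALoop, pvRevSigns, streakBRun, pvSign]
        split_ifs <;> simp_all [ih] <;> omega

theorem pvProc_cons_zero (L : List Int) : pvProc ((0 : Int) :: L) = pvProc L := by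
  simp [pvProc, List.dropWhile]

theorem pvProc_cons_pos (L : List Int) : pvProc ((1 : Int) :: L) = ("up", streakBRun 1 L + 1) := by
  simp [pvProc, List.dropWhile, streakBRun]

theorem pvProc_cons_neg (L : List Int) : pvProc ((-1 : Int) :: L) = ("down", streakBRun (-1) L + 1) := by
  simp [pvProc, List.dropWhile, streakBRun]

theorem streakALoop_steady (scores : List Int) :
    ∀ i, streakALoop scores i "steady" 1 = pvProc (pvRevSigns scores i) := by
  intro i
  induction i with
  | zero => rfl
  | succ i ih =>
      simp only [streakALoop, pvRevSigns]
      by_cases h0 : scores.getD (i + 1) 0 - scores.getD i 0 > 0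
      · rw [if_pos h0]
        simp only [if_true]
        rw [streakALoop_run scores "up" 1 (Or.inl ⟨rfl, rfl⟩) i 1]
        rw [show pvSign (scores.getD (i + 1) 0 - scores.getD i 0) = 1 by
          unfold pvSign; split_ifs <;> omega, pvProc_cons_pos]
        rw [Int.add_comm]
      · by_cases h1 : scores.getD (i + 1) 0 - scores.getD i 0 < 0
        · rw [if_neg h0, if_pos h1]
          simp only [if_true]
          rw [streakALoop_run scores "down" (-1) (Or.inr ⟨rfl, rfl⟩) i 1]
          rw [show pvSign (scores.getD (i + 1) 0 - scores.getD i 0) = -1 by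
            unfold pvSign; split_ifs <;> omega, pvProc_cons_neg]
          rw [Int.add_comm]
        · rw [if_neg h0, if_neg h1]
          simp only [if_true]
          rw [ih]
          rw [show pvSign (scores.getD (i + 1) 0 - scores.getD i 0) = 0 by
            unfold pvSign; split_ifs <;> omega, pvProc_cons_zero]

theorem streak_alt_eq_proc (scores : List Int) :
    streak_direction_alt scores = pvProc (pvRevSigns scores (scores.length - 1)) := by
  rw [← pvSigns_reverse_eq]
  rfl

theorem streak_direction_spec : Claim_equal_streak_direction := by
  intro scores _
  unfold Spec_streak_direction
  rw [streak_alt_eq_proc]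
  unfold streak_direction
  by_cases h : scores.length < 2
  · rw [if_pos h]
    rcases scores with _ | ⟨a, _ | ⟨b, t⟩⟩
    · rfl
    · rfl
    · simp at h
  · rw [if_neg h]
    exact streakALoop_steady scores (scores.length - 1)
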